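-- pv_equiv track=rewrite | github.com/KrashKart/python-problems | indiv_solutions/014-words_with_given_shapes.py | words_with_given_shape
-- ===== SOURCE A (Python) =====
-- def words_with_given_shape(words, shape):
--     def has_shape(word, shape):
--         if len(word) != len(shape) + 1:
--             return False
--         for i in range(len(shape)):
--             if shape[i] == 0 and ord(word[i]) != ord(word[i+1]):
--                 return False
--             elif shape[i] * ord(word[i]) >= shape[i] * ord(word[i+1]) and shape[i] != 0:
--                 return False
--         return True
--     return list(filter(lambda x: has_shape(x, shape), words))
-- ===== SOURCE B (Python) =====
-- def words_with_given_shape(words, shape):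
--     candidates = [w for w in words if len(w) == len(shape) + 1]
--     for i, s in enumerate(shape):
--         if s == 0:
--             candidates = [w for w in candidates if ord(w[i]) == ord(w[i + 1])]
--         elif s > 0:
--             candidates = [w for w in candidates if ord(w[i]) < ord(w[i + 1])]
--         else:
--             candidates = [w for w in candidates if ord(w[i]) > ord(w[i + 1])]
--     return candidates
-- ===== Notes on version B (the rewrite author's own statement) =====
-- stated objective: alternative
-- what changed: B inverts the loop nesting: instead of A's word-major filter with an inner per-index shape check, B first keeps words of the right length and then makes one pass per shape position, each pass narrowing the candidate list by that single position's comparison (shape-major staged filtering).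
import Mathlib
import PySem

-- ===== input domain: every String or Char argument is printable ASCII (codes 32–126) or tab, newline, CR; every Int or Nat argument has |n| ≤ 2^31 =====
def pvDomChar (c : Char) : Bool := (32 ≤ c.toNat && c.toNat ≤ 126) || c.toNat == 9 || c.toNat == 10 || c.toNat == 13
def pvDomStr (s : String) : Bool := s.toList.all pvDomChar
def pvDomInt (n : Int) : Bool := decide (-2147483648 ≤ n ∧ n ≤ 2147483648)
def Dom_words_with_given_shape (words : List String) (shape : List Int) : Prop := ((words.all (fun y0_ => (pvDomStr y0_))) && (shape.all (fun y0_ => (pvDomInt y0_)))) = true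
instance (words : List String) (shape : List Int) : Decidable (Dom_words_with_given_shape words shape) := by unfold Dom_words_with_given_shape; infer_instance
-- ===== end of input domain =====

-- B inverts the loop nesting: A filters words with an inner per-index check; B pre-filters by
-- length and then narrows the candidate list once per shape position (shape-major staged passes).

-- ===== PORT A =====
-- the loop body of has_shape at index i (both string indexings are in range under the length guard,
-- so word[i] / word[i+1] are ported as getD on the char list)
def pvCheckIdx (w : List Char) (shape : List Int) (i : Nat) : Bool :=
  let s := shape.getD i 0
  let a : Int := (w.getD i ' ').toNat
  let b : Int := (w.getD (i + 1) ' ').toNat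
  if s = 0 ∧ a ≠ b then false
  else if s * a ≥ s * b ∧ s ≠ 0 then false
  else true

def pvHasShape (word : String) (shape : List Int) : Bool :=
  let w := word.toList
  if w.length ≠ shape.length + 1 then false
  else (List.range shape.length).all (fun i => pvCheckIdx w shape i)

def words_with_given_shape (words : List String) (shape : List Int) : List String :=
  words.filter (fun x => pvHasShape x shape)

-- ===== PORT B =====
-- one iteration of B's `for i, s in enumerate(shape)` loop: narrow the candidate list at position i
-- (all candidates have the right length, so w[i] / w[i+1] are in range; ported as getD)
def pvNarrow (i : Nat) (s : Int) (cands : List String) : List String :=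
  if s = 0 then
    cands.filter (fun w => (w.toList.getD i ' ').toNat = (w.toList.getD (i + 1) ' ').toNat)
  else if s > 0 then
    cands.filter (fun w => (w.toList.getD i ' ').toNat < (w.toList.getD (i + 1) ' ').toNat)
  else
    cands.filter (fun w => (w.toList.getD (i + 1) ' ').toNat < (w.toList.getD i ' ').toNat)

def words_with_given_shape_alt (words : List String) (shape : List Int) : List String :=
  (shape.foldl (fun st s => (st.1 + 1, pvNarrow st.1 s st.2))
    (0, words.filter (fun w => w.toList.length = shape.length + 1))).2

-- ===== PRECONDITION & SPEC =====
def Spec_words_with_given_shape (words : List String) (shape : List Int) (out : List String) : Prop := out = words_with_given_shape_alt words shape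
instance (words : List String) (shape : List Int) (out : List String) : Decidable (Spec_words_with_given_shape words shape out) := by unfold Spec_words_with_given_shape; infer_instance

-- ===== CLAIM (what is proved, stated in full; the proofs are below) =====
def Claim_equal_words_with_given_shape : Prop := ∀ (words : List String) (shape : List Int), Dom_words_with_given_shape words shape → Spec_words_with_given_shape words shape (words_with_given_shape words shape)

-- ===== LEMMAS AND PROOFS =====

-- the per-position predicate B's narrowing pass keeps
def pvPosOK (i : Nat) (s : Int) (w : String) : Bool :=
  if s = 0 then (w.toList.getD i ' ').toNat = (w.toList.getD (i + 1) ' ').toNat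
  else if s > 0 then (w.toList.getD i ' ').toNat < (w.toList.getD (i + 1) ' ').toNat
  else (w.toList.getD (i + 1) ' ').toNat < (w.toList.getD i ' ').toNat

-- "all positions k, k+1, … of shape hold for w"
def pvAllFrom (k : Nat) (shape : List Int) (w : String) : Bool :=
  match shape with
  | [] => true
  | s :: ss => pvPosOK k s w && pvAllFrom (k + 1) ss w

-- A's check at index i, re-indexed with an offset k (pvCheck2 w ss 0 i = pvCheckIdx w ss i)
def pvCheck2 (w : List Char) (shape : List Int) (k i : Nat) : Bool :=
  let s := shape.getD i 0
  let a : Int := (w.getD (k + i) ' ').toNat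
  let b : Int := (w.getD (k + i + 1) ' ').toNat
  if s = 0 ∧ a ≠ b then false
  else if s * a ≥ s * b ∧ s ≠ 0 then false
  else true

theorem pvNarrow_eq_filter (i : Nat) (s : Int) (cands : List String) :
    pvNarrow i s cands = cands.filter (pvPosOK i s) := by
  unfold pvNarrow pvPosOK
  split_ifs <;> rfl

-- one index of A's loop is one of B's position predicates (abstract form)
theorem pvHead (s a b : Int) :
    (if s = 0 ∧ a ≠ b then false
     else if s * a ≥ s * b ∧ s ≠ 0 then false
     else true)
      = (if s = 0 then decide (a = b) else if s > 0 then decide (a < b) else decide (b < a)) := by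
  rcases lt_trichotomy s 0 with hs | hs | hs
  · have hne : s ≠ 0 := hs.ne
    have hiff : s * a ≥ s * b ↔ a ≤ b := by
      constructor <;> intro h <;> nlinarith
    simp only [hne, hiff, not_lt.2 hs.le, false_and, if_false]
    split_ifs <;> simp_all
  · simp [hs]
  · have hne : s ≠ 0 := hs.ne'
    have hiff : s * a ≥ s * b ↔ b ≤ a := by
      constructor <;> intro h <;> nlinarith
    simp only [hne, hiff, false_and, if_false, hs]
    split_ifs <;> simp_all

theorem pvShift (w : List Char) (s : Int) (ss : List Int) (k i : Nat) :
    pvCheck2 w (s :: ss) k (i + 1) = pvCheck2 w ss (k + 1) i := by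
  unfold pvCheck2
  have h1 : k + (i + 1) = k + 1 + i := by omega
  simp [h1]

-- A's indexed loop over shape equals B's staged predicate, with offset k
theorem pvRangeAll (w : String) : ∀ (shape : List Int) (k : Nat),
    (List.range shape.length).all (fun i => pvCheck2 w.toList shape k i) = pvAllFrom k shape w := by
  intro shape
  induction shape with
  | nil => intro k; simp [pvAllFrom]
  | cons s ss ih =>
      intro k
      have hrange : List.range (ss.length + 1) = 0 :: (List.range ss.length).map Nat.succ :=
        List.range_succ_eq_map
      have h0 : pvCheck2 w.toList (s :: ss) k 0 = pvPosOK k s w := by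
        have := pvHead s ((w.toList.getD k ' ').toNat : Int) ((w.toList.getD (k + 1) ' ').toNat : Int)
        simpa [pvCheck2, pvPosOK, Nat.cast_inj, Nat.cast_lt] using this
      calc (List.range (s :: ss).length).all (fun i => pvCheck2 w.toList (s :: ss) k i)
          = (pvCheck2 w.toList (s :: ss) k 0
              && (List.range ss.length).all (fun i => pvCheck2 w.toList (s :: ss) k (i + 1))) := by
            simp only [List.length_cons, hrange, List.all_cons, List.all_map, Function.comp_def,
              Nat.succ_eq_add_one]
        _ = (pvPosOK k s w && pvAllFrom (k + 1) ss w) := by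
            rw [h0]
            congr 1
            simp only [pvShift]
            exact ih (k + 1)
        _ = pvAllFrom k (s :: ss) w := rfl

-- A's predicate, split into length guard and staged positions
theorem pvHasShape_split (word : String) (shape : List Int) :
    pvHasShape word shape
      = (decide (word.toList.length = shape.length + 1) && pvAllFrom 0 shape word) := by
  unfold pvHasShape
  by_cases h : word.toList.length = shape.length + 1
  · rw [if_neg (not_not_intro h)]
    have : (fun i => pvCheckIdx word.toList shape i)
        = (fun i => pvCheck2 word.toList shape 0 i) := by
      funext i; simp [pvCheckIdx, pvCheck2]
    rw [this, pvRangeAll word shape 0]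
    simp [h]
  · rw [if_pos h]
    have h' : ¬ word.length = shape.length + 1 := by simpa using h
    simp [h']

-- B's fold of narrowing passes is one filter by the staged predicate
theorem pvFold (ss : List Int) : ∀ (k : Nat) (cands : List String),
    (ss.foldl (fun st s => (st.1 + 1, pvNarrow st.1 s st.2)) (k, cands)).2
      = cands.filter (pvAllFrom k ss) := by
  induction ss with
  | nil => intro k cands; simp [pvAllFrom]
  | cons s ss ih =>
      intro k cands
      rw [List.foldl_cons]
      have := ih (k + 1) (pvNarrow k s cands)
      rw [this, pvNarrow_eq_filter, List.filter_filter]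
      simp only [pvAllFrom]
      congr 1
      funext w
      rw [Bool.and_comm]

-- ===== VERDICT (by name: the statement is the Claim_ definition above) =====
theorem words_with_given_shape_spec : Claim_equal_words_with_given_shape := by
  intro words shape _
  unfold Spec_words_with_given_shape words_with_given_shape words_with_given_shape_alt
  rw [pvFold shape 0 (words.filter (fun w => w.toList.length = shape.length + 1)),
    List.filter_filter]
  apply List.filter_congr
  intro w _
  rw [pvHasShape_split]
  rw [Bool.and_comm]
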